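-- pv_equiv track=rewrite | github.com/puruding/siem-soar-project | ai/models/nl2sql/sql_decoder.py | _basic_syntax_check
-- ===== SOURCE A (Python) =====
-- def _basic_syntax_check(sql: str) -> bool:
--     """Basic SQL syntax validation."""
--     # Check parentheses balance
--     if sql.count("(") != sql.count(")"):
--         return False
--
--     # Check quotes balance
--     single_quotes = sql.count("'") - sql.count("\\'")
--     if single_quotes % 2 != 0:
--         return False
--
--     # Must have valid starting keyword
--     valid_starts = ["SELECT", "INSERT", "UPDATE", "DELETE", "WITH", "CREATE", "ALTER", "DROP"]
--     if not any(sql.upper().strip().startswith(kw) for kw in valid_starts):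
--         return False
--
--     return True
-- ===== SOURCE B (Python) =====
-- def _basic_syntax_check(sql: str) -> bool:
--     """Basic SQL syntax validation (single-pass scan instead of separate count() scans)."""
--     bal = 0
--     quotes = 0
--     prev_bs = False
--     for ch in sql:
--         if ch == "(":
--             bal += 1
--         elif ch == ")":
--             bal -= 1
--         elif ch == "'" and not prev_bs:
--             quotes += 1
--         prev_bs = ch == "\\"
--     if bal != 0 or quotes % 2 != 0:
--         return False
--     return sql.upper().strip().startswith(
--         ("SELECT", "INSERT", "UPDATE", "DELETE", "WITH", "CREATE", "ALTER", "DROP"))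
-- ===== Notes on version B (the rewrite author's own statement) =====
-- stated objective: alternative
-- what changed: Replaced the four independent full-string count() scans with a single character loop that maintains a paren balance and an unescaped-quote counter (tracking whether the previous char was a backslash), keeping the starting-keyword check as the final guard; same asymptotic cost, single pass instead of four.
import Mathlib
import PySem

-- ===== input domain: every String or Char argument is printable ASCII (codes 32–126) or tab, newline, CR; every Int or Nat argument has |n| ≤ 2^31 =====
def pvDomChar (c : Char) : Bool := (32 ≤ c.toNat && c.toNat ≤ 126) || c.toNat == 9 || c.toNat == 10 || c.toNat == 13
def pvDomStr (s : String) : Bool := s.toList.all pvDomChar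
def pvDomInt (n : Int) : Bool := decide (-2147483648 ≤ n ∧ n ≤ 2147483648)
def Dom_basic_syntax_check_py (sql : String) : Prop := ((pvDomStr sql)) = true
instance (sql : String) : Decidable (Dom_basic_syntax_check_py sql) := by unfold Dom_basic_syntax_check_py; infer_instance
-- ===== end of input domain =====

-- B replaces A's four full-string count() scans with one single-pass scan (paren balance +
-- unescaped-quote counter); an alternative algorithm with the same return value everywhere.

-- ===== PORT A =====
-- the list of valid starting keywords (shared constant)
def pvValidStarts : List String :=
  ["SELECT", "INSERT", "UPDATE", "DELETE", "WITH", "CREATE", "ALTER", "DROP"]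

def basic_syntax_check_py (sql : String) : Bool :=
  if PySem.Str.count sql "(" ≠ PySem.Str.count sql ")" then false
  else
    let single_quotes : Int := (PySem.Str.count sql "'" : Int) - (PySem.Str.count sql "\\'" : Int)
    if PySem.Int.mod single_quotes 2 ≠ 0 then false
    else if (pvValidStarts.any (fun kw =>
        PySem.Str.startswith (PySem.Str.strip (PySem.Str.upper sql)) kw)) = false then false
    else true

-- ===== PORT B =====
-- B's single loop: carries (prev char was backslash, paren balance, unescaped-quote count)
def pvAltLoop : List Char → Bool → Int → Int → Int × Int
  | [], _, bal, quotes => (bal, quotes)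
  | c :: t, prevBS, bal, quotes =>
    if c = '(' then pvAltLoop t (c = '\\') (bal + 1) quotes
    else if c = ')' then pvAltLoop t (c = '\\') (bal - 1) quotes
    else if c = '\'' ∧ ¬ prevBS then pvAltLoop t (c = '\\') bal (quotes + 1)
    else pvAltLoop t (c = '\\') bal quotes

def basic_syntax_check_py_alt (sql : String) : Bool :=
  let r := pvAltLoop sql.toList false 0 0
  if r.1 ≠ 0 ∨ PySem.Int.mod r.2 2 ≠ 0 then false
  else pvValidStarts.any (fun kw =>
    PySem.Str.startswith (PySem.Str.strip (PySem.Str.upper sql)) kw)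

-- ===== PRECONDITION & SPEC =====
def Spec_basic_syntax_check_py (sql : String) (out : Bool) : Prop := out = basic_syntax_check_py_alt sql
instance (sql : String) (out : Bool) : Decidable (Spec_basic_syntax_check_py sql out) := by unfold Spec_basic_syntax_check_py; infer_instance

-- ===== CLAIM (what is proved, stated in full; the proofs are below) =====
def Claim_equal_basic_syntax_check_py : Prop := ∀ (sql : String), Dom_basic_syntax_check_py sql → Spec_basic_syntax_check_py sql (basic_syntax_check_py sql)

-- ===== LEMMAS AND PROOFS =====

-- number of non-overlapping occurrences of "\\'" (greedy left-to-right, as str.count scans)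
def pvF : List Char → Nat
  | [] => 0
  | [_] => 0
  | a :: b :: t => if a = '\\' ∧ b = '\'' then 1 + pvF t else pvF (b :: t)
  termination_by l => l.length

-- quotes preceded by a backslash (b = previous char was a backslash)
def pvG : Bool → List Char → Nat
  | _, [] => 0
  | b, c :: t => (if c = '\'' ∧ b then 1 else 0) + pvG (c = '\\') t

-- quotes NOT preceded by a backslash
def pvU : Bool → List Char → Nat
  | _, [] => 0
  | b, c :: t => (if c = '\'' ∧ ¬ b then 1 else 0) + pvU (c = '\\') t

theorem pvGo_pair (fuel : Nat) : ∀ (l : List Char) (acc : Nat), l.length ≤ fuel →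
    PySem.Chars.count.go ['\\', '\''] fuel l acc = acc + pvF l := by
  induction fuel with
  | zero =>
    intro l acc h
    have : l = [] := by cases l <;> simp_all
    subst this; simp [PySem.Chars.count.go, pvF]
  | succ n ih =>
    intro l acc h
    match l with
    | [] => simp [PySem.Chars.count.go, pvF]
    | [c] =>
      have hp : (['\\', '\''] : List Char).isPrefixOf [c] = false := by
        simp [List.isPrefixOf]
      simp [PySem.Chars.count.go, hp, pvF]
      rw [ih [] acc (by simp)]; simp [pvF]
    | a :: b :: t =>
      by_cases hab : a = '\\' ∧ b = '\''
      · obtain ⟨ha, hb⟩ := hab; subst ha; subst hb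
        have hp : (['\\', '\''] : List Char).isPrefixOf ('\\' :: '\'' :: t) = true := by
          simp [List.isPrefixOf]
        simp only [PySem.Chars.count.go, hp, if_true]
        rw [ih _ _ (by simp at h ⊢; omega)]
        simp [pvF]; omega
      · have hp : (['\\', '\''] : List Char).isPrefixOf (a :: b :: t) = false := by
          simp [List.isPrefixOf]
          intro ha hb
          first
          | exact hab ⟨ha, hb⟩
          | exact hab ⟨ha.symm, hb.symm⟩
        simp only [PySem.Chars.count.go, hp, Bool.false_eq_true, if_false]
        rw [ih _ _ (by simp at h ⊢; omega)]
        simp [pvF, hab]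

theorem pvGo_single (c : Char) (fuel : Nat) : ∀ (l : List Char) (acc : Nat), l.length ≤ fuel →
    PySem.Chars.count.go [c] fuel l acc = acc + l.count c := by
  induction fuel with
  | zero =>
    intro l acc h
    have : l = [] := by cases l <;> simp_all
    subst this; simp [PySem.Chars.count.go]
  | succ n ih =>
    intro l acc h
    match l with
    | [] => simp [PySem.Chars.count.go]
    | a :: t =>
      by_cases hc : a = c
      · subst hc
        have hp : ([a] : List Char).isPrefixOf (a :: t) = true := by simp [List.isPrefixOf]
        simp only [PySem.Chars.count.go, hp, if_true]
        rw [show List.drop ([a] : List Char).length (a :: t) = t from by simp]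
        rw [ih t (acc + 1) (by simpa using h)]
        simp; omega
      · have hp : ([c] : List Char).isPrefixOf (a :: t) = false := by
          simp [List.isPrefixOf]; exact fun h' => hc h'.symm
        simp only [PySem.Chars.count.go, hp, Bool.false_eq_true, if_false]
        rw [ih t acc (by simpa using h)]
        simp [hc]

theorem pvCount_pair (l : List Char) : PySem.Chars.count l ['\\', '\''] = pvF l := by
  simp [PySem.Chars.count]
  rw [pvGo_pair l.length l 0 le_rfl]; omega

theorem pvCount_single (l : List Char) (c : Char) : PySem.Chars.count l [c] = l.count c := by
  simp [PySem.Chars.count]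
  rw [pvGo_single c l.length l 0 le_rfl]; omega

theorem pvU_add_pvG (l : List Char) : ∀ b, pvU b l + pvG b l = l.count '\'' := by
  induction l with
  | nil => intro b; simp [pvU, pvG]
  | cons c t ih =>
    intro b
    simp only [pvU, pvG, List.count_cons]
    rw [show (if c = '\'' ∧ ¬ b then 1 else 0) + pvU (c = '\\') t +
          ((if c = '\'' ∧ b then 1 else 0) + pvG (c = '\\') t)
        = ((if c = '\'' ∧ ¬ b then 1 else 0) + (if c = '\'' ∧ b then 1 else 0))
          + (pvU (c = '\\') t + pvG (c = '\\') t) by ring]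
    rw [ih (c = '\\')]
    by_cases hq : c = '\'' <;> by_cases hb : b <;> simp [hq, hb] <;> omega

theorem pvG_eq_pvF : ∀ (l : List Char), pvG false l = pvF l := by
  intro l
  induction l using pvF.induct with
  | case1 => simp [pvG, pvF]
  | case2 c => simp [pvG, pvF]
  | case3 a b t hab ih =>
    obtain ⟨ha, hb⟩ := hab; subst ha; subst hb
    simp [pvG, pvF, ih]
  | case4 a b t hab ih =>
    by_cases ha : a = '\\'
    · subst ha
      have hb : ¬ b = '\'' := fun h => hab ⟨rfl, h⟩
      simp only [pvF]
      rw [if_neg (show ¬ (True ∧ b = '\'') by simpa using hb)]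
      simp only [pvG] at ih ⊢
      simp [hb] at ih ⊢
      exact ih
    · simp only [pvF, if_neg hab]
      simp only [pvG] at ih ⊢
      simp [ha]
      simpa using ih

theorem pvAltLoop_spec : ∀ (l : List Char) (b : Bool) (bal q : Int),
    pvAltLoop l b bal q =
      (bal + ((l.count '(' : Int) - (l.count ')' : Int)), q + (pvU b l : Int)) := by
  intro l
  induction l with
  | nil => intro b bal q; simp [pvAltLoop, pvU]
  | cons c t ih =>
    intro b bal q
    by_cases h1 : c = '('
    · subst h1
      rw [show pvAltLoop ('(' :: t) b bal q = pvAltLoop t false (bal + 1) q from by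
        simp [pvAltLoop]]
      rw [ih]
      simp only [Prod.mk.injEq, List.count_cons, pvU]
      constructor
      · push_cast; simp; ring
      · simp
    · by_cases h2 : c = ')'
      · subst h2
        rw [show pvAltLoop (')' :: t) b bal q = pvAltLoop t false (bal - 1) q from by
          simp [pvAltLoop]]
        rw [ih]
        simp only [Prod.mk.injEq, List.count_cons, pvU]
        constructor
        · push_cast; simp; ring
        · simp
      · by_cases h3 : c = '\'' ∧ ¬ b
        · rw [show pvAltLoop (c :: t) b bal q = pvAltLoop t (c = '\\') bal (q + 1) from by
            simp only [pvAltLoop]; rw [if_neg h1, if_neg h2, if_pos h3]]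
          rw [ih]
          simp only [Prod.mk.injEq, List.count_cons, pvU]
          rw [if_pos h3]
          constructor
          · simp [h1, h2]
          · push_cast; ring
        · rw [show pvAltLoop (c :: t) b bal q = pvAltLoop t (c = '\\') bal q from by
            simp only [pvAltLoop]; rw [if_neg h1, if_neg h2, if_neg h3]]
          rw [ih]
          simp only [Prod.mk.injEq, List.count_cons, pvU]
          rw [if_neg h3]
          constructor
          · simp [h1, h2]
          · simp

theorem pvNotAllFalse {α : Type} (l : List α) (p : α → Bool) :
    (!decide (∀ x ∈ l, p x = false)) = l.any p := by
  cases hb : l.any p with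
  | false =>
    rw [List.any_eq_false] at hb
    simp only [Bool.not_eq_true] at hb
    rw [decide_eq_true hb]
    rfl
  | true =>
    rw [List.any_eq_true] at hb
    obtain ⟨x, hx, hpx⟩ := hb
    have hne : ¬ (∀ x ∈ l, p x = false) := fun hall => by
      have := hall x hx
      rw [hpx] at this
      cases this
    rw [decide_eq_false hne]
    rfl

theorem pv_main (sql : String) :
    basic_syntax_check_py sql = basic_syntax_check_py_alt sql := by
  unfold basic_syntax_check_py basic_syntax_check_py_alt
  have e1 : ("(" : String).toList = ['('] := rfl
  have e2 : (")" : String).toList = [')'] := rfl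
  have e3 : ("'" : String).toList = ['\''] := rfl
  have e4 : ("\\'" : String).toList = ['\\', '\''] := rfl
  simp only [PySem.Str.count_eq, e1, e2, e3, e4, pvCount_pair, pvCount_single,
    pvAltLoop_spec sql.toList false 0 0, zero_add]
  have hu : (sql.toList.count '\'' : Int) - (pvF sql.toList : Int) = (pvU false sql.toList : Int) := by
    have := pvU_add_pvG sql.toList false
    rw [pvG_eq_pvF] at this
    omega
  rw [hu]
  by_cases hp : sql.toList.count '(' = sql.toList.count ')'
  · have hz : ((sql.toList.count '(' : Int) - (sql.toList.count ')' : Int)) = 0 := by omega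
    rw [hz]
    simp [hp, pvNotAllFalse]
  · have hz : ¬ ((sql.toList.count '(' : Int) - (sql.toList.count ')' : Int)) = 0 := by omega
    simp [hp, hz]

-- ===== VERDICT (by name: the statement is the Claim_ definition above) =====
theorem basic_syntax_check_py_spec : Claim_equal_basic_syntax_check_py := by
  intro sql _
  unfold Spec_basic_syntax_check_py
  exact pv_main sql
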